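-- pv_equiv track=rewrite | github.com/github/docs | src/code-scanning/generate-code-scanning-query-list.py | get_query_cwes
-- ===== SOURCE A (Python) =====
-- def get_query_cwes(tags):
--     """
--     Returns a list of CWEs that are associated with a query, given its tags.
--     For example, if the list of tags is:
--         maintainability readability external/cwe/cwe-1078 external/cwe/cwe-670 security
--
--     We return:
--         ["1078", "670"]
--     """
--     cwes = []
--     tags = tags.split()
--     for tag in tags:
--         if tag.startswith("external/cwe/cwe-"):
--             cwe = tag.split("-")[-1]
--             cwes.append(cwe)
--     return cwes
-- ===== SOURCE B (Python) =====
-- def get_query_cwes(tags):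
--     # Single streaming pass over the characters: no split() calls, no token list.
--     PREFIX = "external/cwe/cwe-"
--     cwes = []
--     cur = ""   # the current whitespace-delimited token so far
--     buf = ""   # the part of cur after its last '-' (the candidate CWE id)
--     for c in tags:
--         if c.isspace():
--             if cur.startswith(PREFIX):
--                 cwes.append(buf)
--             cur = ""
--             buf = ""
--         else:
--             cur += c
--             buf = "" if c == "-" else buf + c
--     if cur.startswith(PREFIX):
--         cwes.append(buf)
--     return cwes
-- ===== Notes on version B (the rewrite author's own statement) =====
-- stated objective: alternative
-- what changed: B replaces split()-into-a-token-list followed by a per-token prefix test and a per-token split-on-dash last-element extraction by a single streaming pass over the characters that maintains the current token and its after-last-dash suffix incrementally, building no intermediate token lists.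
import Mathlib
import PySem

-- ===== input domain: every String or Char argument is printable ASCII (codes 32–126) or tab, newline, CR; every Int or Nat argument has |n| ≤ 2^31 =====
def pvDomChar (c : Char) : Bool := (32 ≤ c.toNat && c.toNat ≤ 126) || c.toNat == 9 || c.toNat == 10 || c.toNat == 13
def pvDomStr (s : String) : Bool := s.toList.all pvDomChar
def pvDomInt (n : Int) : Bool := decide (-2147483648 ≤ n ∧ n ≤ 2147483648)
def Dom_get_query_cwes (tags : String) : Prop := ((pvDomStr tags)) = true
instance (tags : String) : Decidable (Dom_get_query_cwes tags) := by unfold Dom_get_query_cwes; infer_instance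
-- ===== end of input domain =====

-- B replaces split()-then-test-each-token by a single streaming pass over the characters
-- (objective: alternative, same O(n) cost, no intermediate token list).

-- ===== PORT A =====
-- literal port: split on whitespace, keep tokens starting with the prefix, take the part after the last dash via split.
-- the .getD defaults are totality guards only: sep "-" ≠ "" and split never returns [].
def get_query_cwes (tags : String) : List String :=
  let tags' := PySem.Str.split₀ tags
  tags'.foldl (fun cwes tag =>
    if PySem.Str.startswith tag "external/cwe/cwe-" then
      let cwe := PySem.List.pyGetD ((PySem.Str.split? tag "-").getD []) (-1) ""
      cwes ++ [cwe]
    else cwes) []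

-- ===== PORT B =====
def pvPrefix : List Char := "external/cwe/cwe-".toList

-- one step of Source B's for-loop: state = (cur, buf, cwes)
def pvBstep (st : List Char × List Char × List String) (c : Char) :
    List Char × List Char × List String :=
  let (cur, buf, cwes) := st
  if PySem.Chars.isspace c then
    if PySem.Chars.startswith cur pvPrefix then ([], [], cwes ++ [String.ofList buf])
    else ([], [], cwes)
  else
    (cur ++ [c], if c = '-' then [] else buf ++ [c], cwes)

-- the trailing flush after Source B's loop
def pvBflush (st : List Char × List Char × List String) : List String :=
  if PySem.Chars.startswith st.1 pvPrefix then st.2.2 ++ [String.ofList st.2.1] else st.2.2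

def get_query_cwes_alt (tags : String) : List String :=
  pvBflush (tags.toList.foldl pvBstep ([], [], []))

-- ===== PRECONDITION & SPEC =====
def Spec_get_query_cwes (tags : String) (out : List String) : Prop := out = get_query_cwes_alt tags
instance (tags : String) (out : List String) : Decidable (Spec_get_query_cwes tags out) := by unfold Spec_get_query_cwes; infer_instance

-- ===== CLAIM (what is proved, stated in full; the proofs are below) =====
def Claim_equal_get_query_cwes : Prop := ∀ (tags : String), Dom_get_query_cwes tags → Spec_get_query_cwes tags (get_query_cwes tags)

-- ===== LEMMAS AND PROOFS =====

-- suffix of a token after its last '-' (empty if none yet), as Source B's buf maintains it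
def pvSfx (t : List Char) : List Char :=
  t.foldl (fun b c => if c = '-' then [] else b ++ [c]) []

-- A's per-token result, mapped over the kept tokens
def pvS (toks : List (List Char)) : List String :=
  (toks.filter (fun t => PySem.Chars.startswith t pvPrefix)).map (fun t => String.ofList (pvSfx t))

theorem pvSfx_append (t : List Char) (c : Char) :
    pvSfx (t ++ [c]) = if c = '-' then [] else pvSfx t ++ [c] := by
  simp [pvSfx, List.foldl_append]

theorem pvS_append (a b : List (List Char)) : pvS (a ++ b) = pvS a ++ pvS b := by
  simp [pvS]

theorem splitOn_go_last (t : List Char) : ∀ (fuel : Nat) (cur : List Char)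
    (acc : List (List Char)), t.length < fuel →
    (PySem.Chars.splitOn.go ['-'] fuel t cur acc).getLast? =
      some (t.foldl (fun b c => if c = '-' then [] else b ++ [c]) cur.reverse) := by
  induction t with
  | nil =>
    intro fuel cur acc h
    match fuel, h with
    | fuel+1, _ => simp [PySem.Chars.splitOn.go]
  | cons c r ih =>
    intro fuel cur acc h
    match fuel, h with
    | fuel+1, h =>
      by_cases hc : c = '-'
      · subst hc
        have : List.isPrefixOf ['-'] ('-' :: r) = true := by simp [List.isPrefixOf]
        simp only [PySem.Chars.splitOn.go, this, if_pos]
        rw [show List.drop (['-'].length) ('-' :: r) = r from rfl]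
        rw [ih fuel [] _ (by simpa using h)]
        simp
      · have : List.isPrefixOf ['-'] (c :: r) = false := by
          simp [List.isPrefixOf]; exact fun hh => (hc hh.symm).elim
        simp only [PySem.Chars.splitOn.go, this, Bool.false_eq_true, if_false]
        rw [ih fuel (c :: cur) _ (by simpa using h)]
        simp [hc]

theorem splitOn_last (t : List Char) :
    (PySem.Chars.splitOn t ['-']).getLast? = some (pvSfx t) := by
  have := splitOn_go_last t (t.length + 1) [] [] (by omega)
  simpa [PySem.Chars.splitOn, pvSfx] using this

theorem extract_eq (t : List Char) :
    PySem.List.pyGetD ((PySem.Str.split? (String.ofList t) "-").getD []) (-1) ""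
      = String.ofList (pvSfx t) := by
  have h := splitOn_last t
  have hne : PySem.Chars.splitOn t ['-'] ≠ [] := by
    intro hh; rw [hh] at h; simp at h
  simp only [PySem.Str.split?, String.toList_ofList]
  rw [show ("-" : String).toList = ['-'] from rfl]
  simp only [PySem.Chars.split?, List.isEmpty_cons, Bool.false_eq_true, if_false,
    Option.map_some, Option.getD_some]
  set L := PySem.Chars.splitOn t ['-'] with hL
  have hlen : 1 ≤ L.length := List.length_pos_iff.mpr hne
  simp only [PySem.List.pyGetD, PySem.List.pyGet?, PySem.List.pyIdx?, List.length_map]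
  rw [if_neg (by omega), if_pos (by omega)]
  simp only [Option.bind_some]
  rw [show (-(-1:Int)).toNat = 1 from rfl]
  rw [List.getElem?_map, ← List.getLast?_eq_getElem?, h]
  rfl

theorem A_eq_pvS (tags : String) :
    get_query_cwes tags = pvS (PySem.Chars.split₀ tags.toList) := by
  unfold get_query_cwes
  simp only [PySem.Str.split₀, List.foldl_map]
  have hbody : ∀ (cwes : List String) (t : List Char), t ∈ PySem.Chars.split₀ tags.toList →
      (if PySem.Str.startswith (String.ofList t) "external/cwe/cwe-" then
        cwes ++ [PySem.List.pyGetD ((PySem.Str.split? (String.ofList t) "-").getD []) (-1) ""]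
      else cwes)
      = (if PySem.Chars.startswith t pvPrefix then
          cwes ++ [String.ofList (pvSfx t)] else cwes) := by
    intro cwes t _
    rw [PySem.Str.startswith_eq, String.toList_ofList, extract_eq t]
    rfl
  rw [PySem.List.foldl_congr_mem _ _ _ _ hbody]
  rw [PySem.List.foldl_append_if (fun t => PySem.Chars.startswith t pvPrefix)
    (fun t => String.ofList (pvSfx t))]
  rfl

theorem go_nil (cur : List Char) (acc : List (List Char)) :
    PySem.Chars.split₀.go [] cur acc =
      if cur.isEmpty then acc.reverse else (cur.reverse :: acc).reverse := rfl

theorem go_cons (c : Char) (r cur : List Char) (acc : List (List Char)) :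
    PySem.Chars.split₀.go (c :: r) cur acc =
      if PySem.Chars.isspace c then
        (if cur.isEmpty then PySem.Chars.split₀.go r [] acc
         else PySem.Chars.split₀.go r [] (cur.reverse :: acc))
      else PySem.Chars.split₀.go r (c :: cur) acc := rfl

theorem go_acc (l : List Char) : ∀ (cur : List Char) (acc : List (List Char)),
    PySem.Chars.split₀.go l cur acc = acc.reverse ++ PySem.Chars.split₀.go l cur [] := by
  induction l with
  | nil =>
    intro cur acc
    by_cases h : cur.isEmpty <;> simp [go_nil, h]
  | cons c r ih =>
    intro cur acc
    rw [go_cons, go_cons]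
    by_cases hs : PySem.Chars.isspace c
    · by_cases hc : cur.isEmpty
      · simp only [hs, hc, if_true]
        exact ih [] acc
      · simp only [hs, hc, Bool.false_eq_true, if_false, if_true]
        rw [ih [] (cur.reverse :: acc), ih [] [cur.reverse]]
        simp
    · simp only [hs, Bool.false_eq_true, if_false]
      exact ih (c :: cur) acc

theorem pvS_single (t : List Char) :
    pvS [t] = if PySem.Chars.startswith t pvPrefix then [String.ofList (pvSfx t)] else [] := by
  by_cases h : PySem.Chars.startswith t pvPrefix <;> simp [pvS, h]

theorem startswith_nil : PySem.Chars.startswith [] pvPrefix = false := by decide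

theorem sim (l : List Char) : ∀ (cur : List Char) (cwes : List String),
    pvBflush (l.foldl pvBstep (cur, pvSfx cur, cwes))
      = cwes ++ pvS (PySem.Chars.split₀.go l cur.reverse []) := by
  induction l with
  | nil =>
    intro cur cwes
    simp only [List.foldl_nil, pvBflush]
    cases cur with
    | nil => simp [go_nil, startswith_nil, pvS]
    | cons a as =>
      have hgo : PySem.Chars.split₀.go [] ((a :: as).reverse) [] = [a :: as] := by
        rw [go_nil, if_neg (by simp)]
        simp
      rw [hgo, pvS_single]
      by_cases h : PySem.Chars.startswith (a :: as) pvPrefix <;> simp [h]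
  | cons c r ih =>
    intro cur cwes
    by_cases hs : PySem.Chars.isspace c
    · have hstep : pvBstep (cur, pvSfx cur, cwes) c
          = ([], [], if PySem.Chars.startswith cur pvPrefix then
              cwes ++ [String.ofList (pvSfx cur)] else cwes) := by
        by_cases h : PySem.Chars.startswith cur pvPrefix <;> simp [pvBstep, hs, h]
      have hih := ih [] (if PySem.Chars.startswith cur pvPrefix then
          cwes ++ [String.ofList (pvSfx cur)] else cwes)
      rw [show pvSfx [] = ([] : List Char) from rfl, List.reverse_nil] at hih
      rw [List.foldl_cons, hstep, hih]
      cases cur with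
      | nil =>
        have hgo : PySem.Chars.split₀.go (c :: r) (([] : List Char).reverse) []
            = PySem.Chars.split₀.go r [] [] := by
          rw [go_cons, if_pos hs, if_pos (by simp)]
        rw [hgo, startswith_nil]
        simp
      | cons a as =>
        have hgo : PySem.Chars.split₀.go (c :: r) ((a :: as).reverse) []
            = [a :: as] ++ PySem.Chars.split₀.go r [] [] := by
          rw [go_cons, if_pos hs, if_neg (by simp),
            go_acc r [] [(a :: as).reverse.reverse]]
          simp
        rw [hgo, pvS_append, pvS_single]
        by_cases h : PySem.Chars.startswith (a :: as) pvPrefix <;> simp [h]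
    · have hstep : pvBstep (cur, pvSfx cur, cwes) c
          = (cur ++ [c], pvSfx (cur ++ [c]), cwes) := by
        rw [pvSfx_append]
        simp [pvBstep, hs]
      have hgo : PySem.Chars.split₀.go (c :: r) cur.reverse []
          = PySem.Chars.split₀.go r (c :: cur.reverse) [] := by
        rw [go_cons, if_neg (by simp [hs])]
      rw [List.foldl_cons, hstep, ih (cur ++ [c]) cwes, hgo]
      simp

-- ===== VERDICT (by name: the statement is the Claim_ definition above) =====
theorem get_query_cwes_spec : Claim_equal_get_query_cwes := by
  intro tags _
  show _ = _
  rw [A_eq_pvS, get_query_cwes_alt]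
  have := sim tags.toList [] []
  simp [pvSfx] at this
  rw [this]
  rfl
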